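-- pv_equiv track=rewrite | github.com/srrrs-7/Go_Algorithm | test/3.py | solution
-- ===== SOURCE A (Python) =====
-- def solution(A):
--     n = len(A)
--     if (n <= 1): return 0
--     result = 0
--     for i in range(n - 1):
--         # if adjacent is same, result+1 and i step 2
--         if (A[i] == A[i + 1]):
--             result = result + 1
--             i = i + 1
--     if (result == n - 1):
--         return result - 1
--
--     r = 0
--     for i in range(n):
--         count = 0
--         if (i > 0):
--             if (A[i - 1] != A[i]):
--                 count = count + 1
--             else:
--                 count = count - 1
--         if (i < n - 1):
--             if (A[i + 1] != A[i]):
--                 count = count + 1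
--             else:
--                 count = count - 1
--         r = max(r, count)
--     return result + r
-- ===== SOURCE B (Python) =====
-- def solution(A):
--     n = len(A)
--     if n <= 1:
--         return 0
--     # run-length encode A: runs of consecutive equal values
--     runs = []
--     cur = 1
--     for x, y in zip(A, A[1:]):
--         if x == y:
--             cur += 1
--         else:
--             runs.append(cur)
--             cur = 1
--     runs.append(cur)
--     k = len(runs)
--     if k == 1:
--         return n - 2
--     # score = (n - k) + bonus, where the bonus is 2 if some interior run is a
--     # singleton, 1 if an end run is a singleton, else 0
--     if 1 in runs[1:-1]:
--         bonus = 2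
--     elif runs[0] == 1 or runs[-1] == 1:
--         bonus = 1
--     else:
--         bonus = 0
--     return n - k + bonus
-- ===== Notes on version B (the rewrite author's own statement) =====
-- stated objective: alternative
-- what changed: B run-length encodes the array once and returns (n - #runs) plus a bonus of 2/1/0 read off the run lengths (interior singleton run / singleton end run / none), instead of A's two index re-scans of the array with an adjacent-pair counter and a per-position max accumulator.
import Mathlib
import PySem

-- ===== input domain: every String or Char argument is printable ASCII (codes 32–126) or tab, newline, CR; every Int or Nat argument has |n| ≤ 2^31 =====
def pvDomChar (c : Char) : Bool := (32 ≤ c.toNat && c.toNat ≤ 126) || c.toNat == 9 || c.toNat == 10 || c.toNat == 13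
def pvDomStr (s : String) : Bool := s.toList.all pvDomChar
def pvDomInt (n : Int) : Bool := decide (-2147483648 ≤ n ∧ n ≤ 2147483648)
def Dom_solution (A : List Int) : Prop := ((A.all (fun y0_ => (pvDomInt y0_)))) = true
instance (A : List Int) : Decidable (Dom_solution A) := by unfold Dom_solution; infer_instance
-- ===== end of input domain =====

-- B run-length encodes the array and computes the score as (n - #runs) plus a
-- bonus of 2/1/0 read off the run lengths, instead of A's two per-index re-scans
-- with a max accumulator (objective: alternative).

-- ===== PORT A =====
def solution (A : List Int) : Int :=
  let n : Int := A.length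
  if n ≤ 1 then 0
  else
    -- first loop: count adjacent equal pairs (the `i = i + 1` in A's body is dead:
    -- the for-loop overwrites i on the next iteration)
    let result : Int := (PySem.List.pyRange 0 (n - 1) 1).foldl
      (fun res i =>
        if PySem.List.pyGetD A i 0 = PySem.List.pyGetD A (i + 1) 0 then res + 1 else res) 0
    if result = n - 1 then result - 1
    else
      let r : Int := (PySem.List.pyRange 0 n 1).foldl
        (fun r i =>
          let count0 : Int := 0
          let count1 :=
            if 0 < i then
              (if PySem.List.pyGetD A (i - 1) 0 ≠ PySem.List.pyGetD A i 0
               then count0 + 1 else count0 - 1)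
            else count0
          let count2 :=
            if i < n - 1 then
              (if PySem.List.pyGetD A (i + 1) 0 ≠ PySem.List.pyGetD A i 0
               then count1 + 1 else count1 - 1)
            else count1
          max r count2) 0
      result + r

-- ===== PORT B =====
def solution_alt (A : List Int) : Int :=
  let n : Int := A.length
  if n ≤ 1 then 0
  else
    -- run-length encoding: `for x, y in zip(A, A[1:])` growing (runs, cur)
    let st : List Int × Int := (A.zip A.tail).foldl
      (fun (st : List Int × Int) p =>
        if p.1 = p.2 then (st.1, st.2 + 1) else (st.1 ++ [st.2], 1)) ([], 1)
    let runs : List Int := st.1 ++ [st.2]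
    let k : Int := runs.length
    if k = 1 then n - 2
    else
      let bonus : Int :=
        if (PySem.List.slice runs (some 1) (some (-1))).contains 1 then 2
        else if PySem.List.pyGetD runs 0 0 = 1 ∨ PySem.List.pyGetD runs (-1) 0 = 1 then 1
        else 0
      n - k + bonus

-- ===== PRECONDITION & SPEC =====
def Spec_solution (A : List Int) (out : Int) : Prop := out = solution_alt A
instance (A : List Int) (out : Int) : Decidable (Spec_solution A out) := by unfold Spec_solution; infer_instance

-- ===== CLAIM (what is proved, stated in full; the proofs are below) =====
def Claim_equal_solution : Prop := ∀ (A : List Int), Dom_solution A → Spec_solution A (solution A)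

-- ===== LEMMAS AND PROOFS =====

-- ---------- A-side: reduce A's two folds to the gap table ----------

-- the gap table, characterised by index
theorem pv_eqs_char (A : List Int) (h : 1 ≤ A.length) :
    (A.zip A.tail).map (fun p => p.1 == p.2)
      = (List.range (A.length - 1)).map (fun k => A.getD k 0 == A.getD (k + 1) 0) := by
  apply List.ext_getElem
  · simp
  · intro i h1 h2
    simp only [List.getElem_map, List.getElem_zip, List.getElem_range, List.getElem_tail]
    have hi : i < A.length - 1 := by simpa using h2
    rw [List.getD_eq_getElem A 0 (by omega), List.getD_eq_getElem A 0 (by omega)]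

-- an if-increment fold is a count
theorem pv_fold_count (l : List Nat) (Q : Nat → Bool) (c : Int) :
    l.foldl (fun res k => if Q k then res + 1 else res) c = c + ((l.countP Q : Nat) : Int) := by
  induction l generalizing c with
  | nil => simp
  | cons x xs ih =>
    by_cases hx : Q x <;> simp [hx, ih] <;> ring

def pvGain (e : Bool) : Int := if e then -1 else 1

-- per-position candidate value, in terms of the gap table
def pvC (L : List Bool) (i : Nat) : Int :=
  (if 0 < i then pvGain (L.getD (i - 1) false) else 0)
    + (if i < L.length then pvGain (L.getD i false) else 0)

theorem pv_map_c_eq (L : List Bool) (h : 1 ≤ L.length) :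
    (List.range (L.length + 1)).map (pvC L)
      = pvGain (L.getD 0 false)
          :: ((L.zip L.tail).map (fun p => pvGain p.1 + pvGain p.2)
              ++ [pvGain (L.getD (L.length - 1) false)]) := by
  apply List.ext_getElem
  · simp; omega
  · intro i h1 h2
    simp only [List.getElem_map, List.getElem_range]
    cases i with
    | zero =>
      simp only [List.getElem_cons_zero, pvC]
      rw [if_neg (by omega), if_pos (by omega)]
      simp
    | succ j =>
      have hj : j < L.length := by simpa using h1
      rw [List.getElem_cons_succ]
      have hmids : ((L.zip L.tail).map (fun p => pvGain p.1 + pvGain p.2)).length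
          = L.length - 1 := by simp
      by_cases hjm : j < L.length - 1
      · rw [List.getElem_append_left (by omega)]
        simp only [List.getElem_map, List.getElem_zip, List.getElem_tail, pvC]
        rw [if_pos (by omega), if_pos (by omega),
          List.getD_eq_getElem L false (by omega), List.getD_eq_getElem L false (by omega)]
        simp
      · have hjeq : j = L.length - 1 := by omega
        rw [List.getElem_append_right (by omega)]
        simp only [hmids, pvC]
        rw [if_pos (by omega), if_neg (by omega)]
        subst hjeq
        rw [List.getD_eq_getElem L false (by omega)]
        simp [List.getElem?_eq_getElem hj]

theorem pv_result_eq (A : List Int) (h : 2 ≤ A.length) :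
    (PySem.List.pyRange 0 ((A.length : Int) - 1) 1).foldl
      (fun res i =>
        if PySem.List.pyGetD A i 0 = PySem.List.pyGetD A (i + 1) 0 then res + 1 else res) 0
    = ((((A.zip A.tail).map (fun p => p.1 == p.2)).countP id : Nat) : Int) := by
  rw [pv_eqs_char A (by omega), List.countP_map]
  have hb : (((A.length : Int) - 1) - 0).toNat = A.length - 1 := by omega
  rw [PySem.List.pyRange_one, hb, List.foldl_map]
  have hcast : ∀ k : Nat, ((k : Int)) + 1 = ((k + 1 : Nat) : Int) := by
    intro k; push_cast; ring
  simp only [zero_add, hcast, PySem.List.pyGetD_natCast]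
  have := pv_fold_count (List.range (A.length - 1))
    (fun k => A.getD k 0 == A.getD (k + 1) 0) 0
  simp only [beq_iff_eq] at this ⊢
  rw [this]
  simp

theorem pv_r_eq (A : List Int) (h : 2 ≤ A.length) :
    (PySem.List.pyRange 0 (A.length : Int) 1).foldl
      (fun r i =>
        let count0 : Int := 0
        let count1 :=
          if 0 < i then
            (if PySem.List.pyGetD A (i - 1) 0 ≠ PySem.List.pyGetD A i 0
             then count0 + 1 else count0 - 1)
          else count0
        let count2 :=
          if i < (A.length : Int) - 1 then
            (if PySem.List.pyGetD A (i + 1) 0 ≠ PySem.List.pyGetD A i 0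
             then count1 + 1 else count1 - 1)
          else count1
        max r count2) 0
    = (pvGain (((A.zip A.tail).map (fun p => p.1 == p.2)).getD 0 false)
        :: ((((A.zip A.tail).map (fun p => p.1 == p.2)).zip
              ((A.zip A.tail).map (fun p => p.1 == p.2)).tail).map
            (fun p => pvGain p.1 + pvGain p.2)
            ++ [pvGain (((A.zip A.tail).map (fun p => p.1 == p.2)).getD
                  (((A.zip A.tail).map (fun p => p.1 == p.2)).length - 1) false)])).foldl max 0 := by
  rw [pv_eqs_char A (by omega)]
  set Q : Nat → Bool := fun k => A.getD k 0 == A.getD (k + 1) 0 with hQ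
  set L : List Bool := (List.range (A.length - 1)).map Q with hL
  have hLlen : L.length = A.length - 1 := by simp [hL]
  have hM : 1 ≤ L.length := by omega
  have hLget : ∀ j, j < L.length → L.getD j false = Q j := by
    intro j hj
    rw [List.getD_eq_getElem L false hj]
    simp [hL]
  have hb : ((A.length : Int) - 0).toNat = A.length := by omega
  rw [PySem.List.pyRange_one, hb, List.foldl_map]
  have hbody : (List.range A.length).foldl
      (fun (r : Int) (k : Nat) =>
        let count0 : Int := 0
        let count1 :=
          if 0 < ((0 : Int) + (k : Int)) then
            (if PySem.List.pyGetD A (((0 : Int) + (k : Int)) - 1) 0 ≠ PySem.List.pyGetD A ((0 : Int) + (k : Int)) 0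
             then count0 + 1 else count0 - 1)
          else count0
        let count2 :=
          if ((0 : Int) + (k : Int)) < (A.length : Int) - 1 then
            (if PySem.List.pyGetD A (((0 : Int) + (k : Int)) + 1) 0 ≠ PySem.List.pyGetD A ((0 : Int) + (k : Int)) 0
             then count1 + 1 else count1 - 1)
          else count1
        max r count2) 0
      = (List.range A.length).foldl (fun r k => max r (pvC L k)) 0 := by
    apply PySem.List.foldl_congr_mem
    intro r k hk
    have hkA : k < A.length := List.mem_range.mp hk
    simp only [zero_add]
    congr 1
    have g0 : PySem.List.pyGetD A ((k : Int)) 0 = A.getD k 0 := by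
      simp only [PySem.List.pyGetD_natCast]
    have gp : PySem.List.pyGetD A ((k : Int) + 1) 0 = A.getD (k + 1) 0 := by
      rw [show ((k : Int) + 1) = ((k + 1 : Nat) : Int) by push_cast; ring]
      simp only [PySem.List.pyGetD_natCast]
    simp only [g0, gp]
    by_cases hk0 : 0 < k
    · have gm : PySem.List.pyGetD A ((k : Int) - 1) 0 = A.getD (k - 1) 0 := by
        rw [show ((k : Int) - 1) = ((k - 1 : Nat) : Int) by omega]
        simp only [PySem.List.pyGetD_natCast]
      have c1 : ((0 : Int) < (k : Int)) = True := eq_true (by omega)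
      have hk1 : k - 1 + 1 = k := by omega
      by_cases hkm : k < A.length - 1
      · have c2 : (((k : Int)) < (A.length : Int) - 1) = True := eq_true (by omega)
        simp only [gm, c1, c2, if_true]
        simp only [pvC, if_pos hk0, if_pos (show k < L.length by omega),
          hLget (k - 1) (by omega), hLget k (by omega), hQ, hk1]
        by_cases e1 : A.getD (k - 1) 0 = A.getD k 0 <;>
          by_cases e2 : A.getD k 0 = A.getD (k + 1) 0
        · rw [if_neg (fun hx => hx e2.symm), if_neg (fun hx => hx e1)]
          simp only [pvGain, beq_iff_eq]
          rw [if_pos e1, if_pos e2]; norm_num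
        · rw [if_pos (fun hx => e2 hx.symm), if_neg (fun hx => hx e1)]
          simp only [pvGain, beq_iff_eq]
          rw [if_pos e1, if_neg e2]; norm_num
        · rw [if_neg (fun hx => hx e2.symm), if_pos e1]
          simp only [pvGain, beq_iff_eq]
          rw [if_neg e1, if_pos e2]; norm_num
        · rw [if_pos (fun hx => e2 hx.symm), if_pos e1]
          simp only [pvGain, beq_iff_eq]
          rw [if_neg e1, if_neg e2]
      · have c2 : (((k : Int)) < (A.length : Int) - 1) = False := eq_false (by omega)
        simp only [gm, c1, c2, if_true, if_false]
        simp only [pvC, if_pos hk0, if_neg (show ¬ k < L.length by omega),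
          hLget (k - 1) (by omega), hQ, hk1]
        by_cases e1 : A.getD (k - 1) 0 = A.getD k 0 <;> simp [e1, pvGain] <;> norm_num
    · have c1 : ((0 : Int) < (k : Int)) = False := eq_false (by omega)
      have c2 : (((k : Int)) < (A.length : Int) - 1) = True := eq_true (by omega)
      simp only [c1, c2, if_true, if_false]
      simp only [pvC, if_neg hk0, if_pos (show k < L.length by omega),
        hLget k (by omega), hQ]
      by_cases e2 : A.getD k 0 = A.getD (k + 1) 0
      · rw [if_neg (fun hx => hx e2.symm)]
        simp only [pvGain, beq_iff_eq]
        rw [if_pos e2]; norm_num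
      · rw [if_pos (fun hx => e2 hx.symm)]
        simp only [pvGain, beq_iff_eq]
        rw [if_neg e2]
  rw [hbody]
  have hrange : A.length = L.length + 1 := by omega
  rw [hrange, ← List.foldl_map, pv_map_c_eq L hM]

-- ---------- folded max, characterised ----------

theorem pv_le_foldl_max (l : List Int) (c : Int) : c ≤ l.foldl max c := by
  induction l generalizing c with
  | nil => simp
  | cons x xs ih => exact le_trans (le_max_left c x) (ih (max c x))

theorem pv_mem_le_foldl_max (l : List Int) : ∀ (c x : Int), x ∈ l → x ≤ l.foldl max c := by
  induction l with
  | nil => intro c x hx; simp at hx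
  | cons y ys ih =>
    intro c x hx
    rcases List.mem_cons.mp hx with h | h
    · subst h; exact le_trans (le_max_right c x) (pv_le_foldl_max ys (max c x))
    · exact ih (max c y) x h

theorem pv_foldl_max_mem (l : List Int) (c : Int) : l.foldl max c = c ∨ l.foldl max c ∈ l := by
  induction l generalizing c with
  | nil => left; rfl
  | cons y ys ih =>
    rcases ih (max c y) with h | h
    · simp only [List.foldl_cons] at *
      rcases max_choice c y with hm | hm
      · left; rw [h, hm]
      · right; rw [h, hm]; exact List.mem_cons_self
    · right; exact List.mem_cons.mpr (Or.inr h)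

theorem pv_foldl_max_eq (l : List Int) (m : Int) (h0 : 0 ≤ m)
    (hmem : m = 0 ∨ m ∈ l) (hub : ∀ x ∈ l, x ≤ m) : l.foldl max 0 = m := by
  apply le_antisymm
  · rcases pv_foldl_max_mem l 0 with h | h
    · rw [h]; exact h0
    · exact hub _ h
  · rcases hmem with h | h
    · rw [h]; exact pv_le_foldl_max l 0
    · exact pv_mem_le_foldl_max l 0 m h

-- ---------- the FF predicate (two adjacent unequal gaps) ----------

def pvFF : List Bool → Bool
  | a :: b :: t => (!a && !b) || pvFF (b :: t)
  | _ => false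

theorem pv_ff_iff (L : List Bool) :
    pvFF L = true ↔ ∃ p ∈ L.zip L.tail, p.1 = false ∧ p.2 = false := by
  induction L with
  | nil => simp [pvFF]
  | cons a t ih =>
    cases t with
    | nil => simp [pvFF]
    | cons b t' =>
      rw [show (a :: b :: t').tail = b :: t' from rfl, List.zip_cons_cons]
      simp only [pvFF, Bool.or_eq_true, Bool.and_eq_true, Bool.not_eq_true',
        List.mem_cons, ih]
      constructor
      · rintro (⟨h1, h2⟩ | ⟨p, hp, h1, h2⟩)
        · exact ⟨(a, b), Or.inl rfl, h1, h2⟩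
        · exact ⟨p, Or.inr hp, h1, h2⟩
      · rintro ⟨p, hp | hp, h1, h2⟩
        · subst hp; exact Or.inl ⟨h1, h2⟩
        · exact Or.inr ⟨p, hp, h1, h2⟩

theorem pv_ff_cons_true (t : List Bool) : pvFF (true :: t) = pvFF t := by
  cases t with
  | nil => rfl
  | cons b t' => simp [pvFF]

theorem pv_ff_cons_false (t : List Bool) :
    pvFF (false :: t) = true ↔ t.head? = some false ∨ pvFF t = true := by
  cases t with
  | nil => simp [pvFF]
  | cons b t' => cases b <;> simp [pvFF]

-- ---------- A-side bonus: foldl max of the candidates, in closed form ----------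

theorem pv_gain_le_one (e : Bool) : pvGain e ≤ 1 := by cases e <;> simp [pvGain]

theorem pv_bonus_eq (L : List Bool) (hne : L ≠ []) :
    (pvGain (L.getD 0 false)
      :: ((L.zip L.tail).map (fun p => pvGain p.1 + pvGain p.2)
          ++ [pvGain (L.getD (L.length - 1) false)])).foldl max 0
    = if pvFF L = true then 2
      else if L.head? = some false ∨ L.getLast? = some false then 1 else 0 := by
  have hlen : 1 ≤ L.length := by
    cases L with | nil => exact absurd rfl hne | cons a t => simp
  have hhead : L.getD 0 false = L.head?.getD false := by
    cases L with | nil => rfl | cons a t => rfl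
  have hlast : L.getD (L.length - 1) false = (L.getLast?).getD false := by
    rw [List.getD_eq_getElem L false (by omega), List.getLast?_eq_getElem?]
    rw [List.getElem?_eq_getElem (by omega)]
    rfl
  apply pv_foldl_max_eq
  · split_ifs <;> norm_num
  · by_cases hff : pvFF L = true
    · rw [if_pos hff]
      obtain ⟨p, hp, h1, h2⟩ := (pv_ff_iff L).mp hff
      right
      refine List.mem_cons.mpr (Or.inr (List.mem_append.mpr (Or.inl ?_)))
      refine List.mem_map.mpr ⟨p, hp, ?_⟩
      rw [h1, h2]; rfl
    · rw [if_neg hff]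
      by_cases hends : L.head? = some false ∨ L.getLast? = some false
      · rw [if_pos hends]
        right
        rcases hends with h | h
        · refine List.mem_cons.mpr (Or.inl ?_)
          rw [hhead, h]; rfl
        · refine List.mem_cons.mpr (Or.inr (List.mem_append.mpr (Or.inr ?_)))
          rw [hlast, h]; simp [pvGain]
      · rw [if_neg hends]; left; rfl
  · intro x hx
    have hmid_le : ∀ x, pvFF L ≠ true →
        x ∈ (L.zip L.tail).map (fun p => pvGain p.1 + pvGain p.2) → x ≤ 0 := by
      intro y hff hy
      obtain ⟨p, hp, hpy⟩ := List.mem_map.mp hy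
      by_cases h1 : p.1 = false
      · by_cases h2 : p.2 = false
        · exact absurd ((pv_ff_iff L).mpr ⟨p, hp, h1, h2⟩) hff
        · have : p.2 = true := by cases hb : p.2 <;> simp_all
          rw [← hpy, h1, this]; simp [pvGain]
      · have : p.1 = true := by cases hb : p.1 <;> simp_all
        rw [← hpy, this]
        have h2 := pv_gain_le_one p.2
        have h3 : pvGain true = -1 := rfl
        omega
    split_ifs with hff hends
    · -- bound 2
      rcases List.mem_cons.mp hx with h | h
      · rw [h]; have := pv_gain_le_one (L.getD 0 false); omega
      rcases List.mem_append.mp h with h | h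
      · obtain ⟨p, hp, hpy⟩ := List.mem_map.mp h
        have := pv_gain_le_one p.1; have := pv_gain_le_one p.2; omega
      · simp only [List.mem_singleton] at h
        rw [h]; have := pv_gain_le_one (L.getD (L.length - 1) false); omega
    · -- bound 1, no FF
      rcases List.mem_cons.mp hx with h | h
      · rw [h]; exact pv_gain_le_one _
      rcases List.mem_append.mp h with h | h
      · have := hmid_le x (by simp [hff]) h; omega
      · simp only [List.mem_singleton] at h
        rw [h]; exact pv_gain_le_one _
    · -- bound 0: both ends are `true` gaps
      push_neg at hends
      obtain ⟨hh, hl⟩ := hends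
      have hh' : L.head? = some true := by
        cases hL : L.head? with
        | none => cases L with
          | nil => exact absurd rfl hne
          | cons a t => simp at hL
        | some b => cases b with
          | false => exact absurd hL hh
          | true => rfl
      have hl' : L.getLast? = some true := by
        cases hL : L.getLast? with
        | none => rw [List.getLast?_eq_none_iff] at hL; exact absurd hL hne
        | some b => cases b with
          | false => exact absurd hL hl
          | true => rfl
      rcases List.mem_cons.mp hx with h | h
      · rw [h, hhead, hh']; simp [pvGain]
      rcases List.mem_append.mp h with h | h
      · exact hmid_le x (by simp [hff]) h
      · simp only [List.mem_singleton] at h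
        rw [h, hlast, hl']; simp [pvGain]

-- ---------- B-side: the run-length fold, characterised ----------

def pvG : List Bool → Int → List Int
  | [], c => [c]
  | true :: t, c => pvG t (c + 1)
  | false :: t, c => c :: pvG t 1

theorem pv_runs_fold (L : List Bool) : ∀ (rs : List Int) (c : Int),
    (L.foldl
        (fun (st : List Int × Int) e => if e = true then (st.1, st.2 + 1) else (st.1 ++ [st.2], 1))
        (rs, c)).1
      ++ [(L.foldl
        (fun (st : List Int × Int) e => if e = true then (st.1, st.2 + 1) else (st.1 ++ [st.2], 1))
        (rs, c)).2] = rs ++ pvG L c := by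
  induction L with
  | nil => intro rs c; simp [pvG]
  | cons a t ih =>
    intro rs c
    cases a with
    | true => simpa [pvG] using ih rs (c + 1)
    | false => simpa [pvG] using ih (rs ++ [c]) 1

theorem pv_g_ne_nil (L : List Bool) (c : Int) : pvG L c ≠ [] := by
  induction L generalizing c with
  | nil => simp [pvG]
  | cons a t ih => cases a <;> simp [pvG, ih]

theorem pv_g_length (L : List Bool) (c : Int) :
    (pvG L c).length = L.countP (fun e => !e) + 1 := by
  induction L generalizing c with
  | nil => simp [pvG]
  | cons a t ih => cases a <;> simp [pvG, ih, List.countP_cons]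

theorem pv_g_all_true (L : List Bool) (c : Int) (h : L.all id = true) :
    pvG L c = [c + L.length] := by
  induction L generalizing c with
  | nil => simp [pvG]
  | cons a t ih =>
    cases a with
    | true =>
      simp only [List.all_cons, id, Bool.true_and] at h
      rw [show pvG (true :: t) c = pvG t (c + 1) from rfl, ih (c + 1) h]
      simp; push_cast; ring
    | false => simp at h

theorem pv_g_head_ge (L : List Bool) (c : Int) : c ≤ (pvG L c).head?.getD 0 ∨ (pvG L c).head?.getD 0 = c := by
  induction L generalizing c with
  | nil => right; rfl
  | cons a t ih =>
    cases a with
    | true =>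
      rcases ih (c + 1) with h | h
      · left; rw [show pvG (true :: t) c = pvG t (c + 1) from rfl]; omega
      · left; rw [show pvG (true :: t) c = pvG t (c + 1) from rfl, h]; omega
    | false => right; rfl

theorem pv_g_head (L : List Bool) (c : Int) (hc : 1 ≤ c) :
    ((pvG L c).head?.getD 0 = 1 ↔ c = 1 ∧ (L = [] ∨ L.head? = some false)) := by
  induction L generalizing c with
  | nil => simp [pvG]
  | cons a t ih =>
    cases a with
    | true =>
      rw [show pvG (true :: t) c = pvG t (c + 1) from rfl]
      have hge : c + 1 ≤ (pvG t (c + 1)).head?.getD 0 ∨ (pvG t (c + 1)).head?.getD 0 = c + 1 := pv_g_head_ge t (c + 1)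
      constructor
      · intro h; exfalso; rcases hge with hg | hg <;> omega
      · rintro ⟨_, h | h⟩ <;> simp at h
    | false =>
      rw [show pvG (false :: t) c = c :: pvG t 1 from rfl]
      simp [hc]

theorem pv_getLast?_cons_of_ne_nil {α : Type} (a : α) (l : List α) (h : l ≠ []) :
    (a :: l).getLast? = l.getLast? := by
  cases l with
  | nil => exact absurd rfl h
  | cons b t => rfl

theorem pv_g_last (L : List Bool) (c : Int) (hf : L.any (fun e => !e) = true) :
    ((pvG L c).getLast? = some 1 ↔ L.getLast? = some false) := by
  induction L generalizing c with
  | nil => simp at hf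
  | cons a t ih =>
    cases a with
    | true =>
      have hf' : t.any (fun e => !e) = true := by simpa using hf
      have htne : t ≠ [] := by
        intro h; rw [h] at hf'; simp at hf'
      rw [show pvG (true :: t) c = pvG t (c + 1) from rfl, ih (c + 1) hf',
        pv_getLast?_cons_of_ne_nil _ _ htne]
    | false =>
      rw [show pvG (false :: t) c = c :: pvG t 1 from rfl]
      have h2 : (c :: pvG t 1).getLast? = (pvG t 1).getLast? :=
        pv_getLast?_cons_of_ne_nil _ _ (pv_g_ne_nil t 1)
      rw [h2]
      by_cases hft : t.any (fun e => !e) = true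
      · have htne : t ≠ [] := by intro h; rw [h] at hft; simp at hft
        rw [ih 1 hft, pv_getLast?_cons_of_ne_nil _ _ htne]
      · have hall : t.all id = true := by
          rw [List.all_eq_true]
          intro x hx
          by_contra hxf
          have : x = false := by cases x <;> simp_all
          exact hft (List.any_eq_true.mpr ⟨x, hx, by simp [this]⟩)
        rw [pv_g_all_true t 1 hall]
        cases t with
        | nil => simp
        | cons b t' =>
          have hb : b = true := by
            have := List.all_eq_true.mp hall b List.mem_cons_self
            simpa using this
          have htne : (b :: t') ≠ [] := by simp
          rw [pv_getLast?_cons_of_ne_nil false (b :: t') (by simp)]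
          have hlast : (b :: t').getLast? = some true := by
            have hm := List.getLast_mem (l := b :: t') (by simp)
            have := List.all_eq_true.mp hall _ hm
            rw [List.getLast?_eq_some_getLast (by simp)]
            simpa using this
          rw [hlast]
          constructor
          · intro h; simp at h; omega
          · intro h; simp at h

-- 1 occurs strictly inside dropLast (with the head kept)
theorem pv_g_mem_dropLast (L : List Bool) (c : Int) (hc : 1 ≤ c) :
    ((1 : Int) ∈ (pvG L c).dropLast ↔ (c = 1 ∧ L.head? = some false) ∨ pvFF L = true) := by
  induction L generalizing c with
  | nil => simp [pvG, pvFF]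
  | cons a t ih =>
    cases a with
    | true =>
      rw [show pvG (true :: t) c = pvG t (c + 1) from rfl, ih (c + 1) (by omega),
        pv_ff_cons_true]
      constructor
      · rintro (⟨h, _⟩ | h)
        · omega
        · exact Or.inr h
      · rintro (⟨_, h⟩ | h)
        · simp at h
        · exact Or.inr h
    | false =>
      rw [show pvG (false :: t) c = c :: pvG t 1 from rfl,
        List.dropLast_cons_of_ne_nil (pv_g_ne_nil t 1)]
      simp only [List.mem_cons]
      rw [ih 1 (by omega)]
      constructor
      · rintro (h | ⟨_, h⟩ | h)
        · exact Or.inl ⟨h.symm, rfl⟩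
        · exact Or.inr ((pv_ff_cons_false t).mpr (Or.inl h))
        · exact Or.inr ((pv_ff_cons_false t).mpr (Or.inr h))
      · rintro (⟨h, _⟩ | h)
        · exact Or.inl h.symm
        · rcases (pv_ff_cons_false t).mp h with h' | h'
          · exact Or.inr (Or.inl ⟨rfl, h'⟩)
          · exact Or.inr (Or.inr h')

-- the interior runs contain a singleton iff two unequal gaps are adjacent
theorem pv_g_interior (L : List Bool) (c : Int) :
    ((1 : Int) ∈ ((pvG L c).drop 1).dropLast ↔ pvFF L = true) := by
  induction L generalizing c with
  | nil => simp [pvG, pvFF]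
  | cons a t ih =>
    cases a with
    | true =>
      rw [show pvG (true :: t) c = pvG t (c + 1) from rfl, ih (c + 1), pv_ff_cons_true]
    | false =>
      rw [show pvG (false :: t) c = c :: pvG t 1 from rfl, List.drop_one,
        List.tail_cons, pv_g_mem_dropLast t 1 (by omega), pv_ff_cons_false]
      constructor
      · rintro (⟨_, h⟩ | h)
        · exact Or.inl h
        · exact Or.inr h
      · rintro (h | h)
        · exact Or.inl ⟨rfl, h⟩
        · exact Or.inr h

-- runs[1:-1] is drop 1 / dropLast
theorem pv_slice_one_neg_one (xs : List Int) :
    PySem.List.slice xs (some 1) (some (-1)) = (xs.drop 1).dropLast := by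
  have h1 : PySem.List.clampIdx xs.length 1 = min 1 xs.length := by
    rw [show (1 : Int) = ((1 : Nat) : Int) from rfl, PySem.List.clampIdx_natCast]
  rw [PySem.List.slice, h1, PySem.List.clampIdx_neg_one]
  cases xs with
  | nil => rfl
  | cons x t =>
    have hmin : min 1 (x :: t).length = 1 := by simp
    rw [hmin, List.dropLast_eq_take]
    simp [List.take_drop]

-- countP of the gaps versus the run count
theorem pv_count_split (L : List Bool) :
    L.countP id + L.countP (fun e => !e) = L.length := by
  induction L with
  | nil => rfl
  | cons a t ih => cases a <;> simp [List.countP_cons, ih] <;> omega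

-- ===== VERDICT (by name: the statement is the Claim_ definition above) =====
theorem solution_spec : Claim_equal_solution := by
  intro A _
  unfold Spec_solution solution solution_alt
  by_cases h1 : (A.length : Int) ≤ 1
  · simp [h1]
  · have h2 : 2 ≤ A.length := by omega
    simp only [h1, if_false]
    set L : List Bool := (A.zip A.tail).map (fun p => p.1 == p.2) with hLdef
    have hLlen : L.length = A.length - 1 := by
      rw [hLdef]
      simp only [List.length_map, List.length_zip, List.length_tail]
      omega
    have hLne : L ≠ [] := by
      intro h
      rw [h] at hLlen
      simp at hLlen
      omega
    -- B's fold builds pvG L 1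
    have hstep : (A.zip A.tail).foldl
        (fun (st : List Int × Int) p =>
          if p.1 = p.2 then (st.1, st.2 + 1) else (st.1 ++ [st.2], 1)) ([], 1)
        = L.foldl
        (fun (st : List Int × Int) e => if e = true then (st.1, st.2 + 1) else (st.1 ++ [st.2], 1))
        ([], 1) := by
      rw [hLdef, List.foldl_map]
      apply PySem.List.foldl_congr_mem
      intro st p _
      by_cases h : p.1 = p.2 <;> simp [h]
    have hruns : ((A.zip A.tail).foldl
        (fun (st : List Int × Int) p =>
          if p.1 = p.2 then (st.1, st.2 + 1) else (st.1 ++ [st.2], 1)) ([], 1)).1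
        ++ [((A.zip A.tail).foldl
        (fun (st : List Int × Int) p =>
          if p.1 = p.2 then (st.1, st.2 + 1) else (st.1 ++ [st.2], 1)) ([], 1)).2]
        = pvG L 1 := by
      rw [hstep]
      simpa using pv_runs_fold L [] 1
    have hklen : (pvG L 1).length = L.countP (fun e => !e) + 1 := pv_g_length L 1
    have hcount := pv_count_split L
    -- A's first fold is the countP of the gap table
    have hres := pv_result_eq A h2
    rw [← hLdef] at hres
    simp only [hruns, hres]
    by_cases hall : ((L.countP id : Nat) : Int) = (A.length : Int) - 1
    · -- all gaps equal: A returns result-1, B returns n-2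
      have hk1 : ((pvG L 1).length : Int) = 1 := by
        rw [hklen]
        have : L.countP (fun e => !e) = 0 := by omega
        rw [this]; simp
      rw [if_pos hall, if_pos hk1, hall]
      omega
    · rw [if_neg hall]
      have hk1 : ¬ ((pvG L 1).length : Int) = 1 := by
        rw [hklen]
        intro h
        have : L.countP (fun e => !e) = 0 := by omega
        have : ((L.countP id : Nat) : Int) = (A.length : Int) - 1 := by omega
        exact hall this
      rw [if_neg hk1]
      -- L has a false gap
      have hany : L.any (fun e => !e) = true := by
        by_contra h
        have hall' : L.countP (fun e => !e) = 0 := by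
          rw [List.countP_eq_zero]
          intro x hx
          by_contra hb
          exact h (List.any_eq_true.mpr ⟨x, hx, by simpa using hb⟩)
        apply hall
        omega
      -- A's second fold is the closed-form bonus
      have hr := pv_r_eq A h2
      rw [← hLdef] at hr
      rw [hr, pv_bonus_eq L hLne]
      -- B's bonus tests
      rw [pv_slice_one_neg_one (pvG L 1)]
      have hcontains : ((pvG L 1).drop 1).dropLast.contains 1 = pvFF L := by
        rcases hb : pvFF L with _ | _
        · simp only [List.contains_eq_mem, decide_eq_false_iff_not]
          rw [pv_g_interior L 1, hb]
          simp
        · simp only [List.contains_eq_mem, decide_eq_true_iff]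
          rw [pv_g_interior L 1, hb]
      have hhead : PySem.List.pyGetD (pvG L 1) 0 0 = (pvG L 1).head?.getD 0 := by
        rw [PySem.List.pyGetD_zero]
        cases hg : pvG L 1 with
        | nil => exact absurd hg (pv_g_ne_nil L 1)
        | cons x t => rfl
      have hlastval : PySem.List.pyGetD (pvG L 1) (-1) 0 = ((pvG L 1).getLast?).getD 0 := by
        rw [PySem.List.pyGetD_neg_one (h := pv_g_ne_nil L 1),
          List.getLast?_eq_some_getLast (pv_g_ne_nil L 1)]
        rfl
      have hheadiff : ((pvG L 1).head?.getD 0 = 1 ↔ L.head? = some false) := by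
        rw [pv_g_head L 1 (by omega)]
        constructor
        · rintro ⟨_, h | h⟩
          · exact absurd h hLne
          · exact h
        · intro h; exact ⟨rfl, Or.inr h⟩
      have hlastiff : (((pvG L 1).getLast?).getD 0 = 1 ↔ L.getLast? = some false) := by
        rw [← pv_g_last L 1 hany]
        cases hg : (pvG L 1).getLast? with
        | none =>
          rw [List.getLast?_eq_none_iff] at hg
          exact absurd hg (pv_g_ne_nil L 1)
        | some v => simp
      -- assemble
      have hn1 : ((A.length : Int)) - ((pvG L 1).length : Int) = ((L.countP id : Nat) : Int) := by
        rw [hklen]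
        push_cast
        omega
      rcases hb : pvFF L with _ | _
      · rw [hcontains, hb]
        simp only [Bool.false_eq_true, if_false]
        rw [hhead, hlastval]
        by_cases hends : L.head? = some false ∨ L.getLast? = some false
        · rw [if_pos hends,
            if_pos (by rw [hheadiff, hlastiff]; exact hends)]
          omega
        · rw [if_neg hends,
            if_neg (by rw [hheadiff, hlastiff]; exact hends)]
          omega
      · rw [hcontains, hb]
        simp only [if_true]
        omega
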